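-- pv_equiv track=rewrite | github.com/MJeremy2017/system-design | code/5.py | solve
-- ===== SOURCE A (Python) =====
-- from collections import defaultdict
-- import bisect as bs
--
-- def solve(s: str, words: list) -> list:
--     ans_words = []
--     ms = defaultdict(list)
--     for i, ch in enumerate(s):
--         ms[ch].append(i)
--
--     for word in words:
--         v = -1
--         can = True
--         for ch in word:
--             if ch not in ms:
--                 can = False
--                 break
--             pos = bs.bisect(ms[ch], v)
--             if pos >= len(ms[ch]):
--                 can = False
--                 break
--             v = ms[ch][pos]
--         if can: ans_words.append(word)
--     return ans_words
-- ===== SOURCE B (Python) =====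
-- def solve(s: str, words: list) -> list:
--     # Greedy subsequence test: consume one shared left-to-right iterator of s
--     # per word ('c in it' scans the iterator up to and including the first c).
--     def is_sub(word):
--         it = iter(s)
--         return all(c in it for c in word)
--     return [w for w in words if is_sub(w)]
-- ===== Notes on version B (the rewrite author's own statement) =====
-- stated objective: idiomatic
-- what changed: A precomputes a per-character position index of s and binary-searches (bisect) it for each word character; B drops the index entirely and greedily consumes a single left-to-right iterator of s per word (the idiomatic is-subsequence test).
import Mathlib
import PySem

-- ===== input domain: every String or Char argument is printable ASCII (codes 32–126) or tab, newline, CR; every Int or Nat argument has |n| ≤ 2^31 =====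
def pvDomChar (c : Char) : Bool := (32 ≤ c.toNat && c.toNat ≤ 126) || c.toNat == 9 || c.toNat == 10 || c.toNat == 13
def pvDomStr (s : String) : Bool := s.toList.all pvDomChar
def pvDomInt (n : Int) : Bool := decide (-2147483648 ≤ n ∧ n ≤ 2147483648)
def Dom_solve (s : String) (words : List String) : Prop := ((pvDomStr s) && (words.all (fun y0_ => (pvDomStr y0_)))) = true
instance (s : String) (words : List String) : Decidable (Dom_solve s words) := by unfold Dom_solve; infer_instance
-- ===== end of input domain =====

-- B replaces A's per-character position index + bisect with the idiomatic greedy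
-- single-iterator subsequence test; same return value, no speed claim.

-- ===== PORT A =====
-- the three bisect lines of A's inner loop: first element of lst strictly greater
-- than v (bs.bisect = bisect_right = PySem.List.bisectRight; ms[ch][pos] is guarded
-- by pos < len, so getD is exact)
def nextA (lst : List Int) (v : Int) : Option Int :=
  let pos := PySem.List.bisectRight lst v
  if pos ≥ lst.length then none else some (lst.getD pos 0)

-- A's inner 'for ch in word' loop with state v and the two 'can = False; break' exits
def goA (ms : PySem.Dict Char (List Int)) : List Char → Int → Bool
  | [], _ => true
  | ch :: rest, v =>
    if ms.contains ch = false then false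
    else
      match nextA (ms.getD ch []) v with
      | none => false
      | some j => goA ms rest j

-- ms: defaultdict(list); for i, ch in enumerate(s): ms[ch].append(i)
def msOf (cs : List Char) : PySem.Dict Char (List Int) :=
  (PySem.List.enumerate cs).foldl
    (fun d p => d.modify p.2 [] (fun l => l ++ [p.1])) PySem.Dict.empty

def solve (s : String) (words : List String) : List String :=
  words.foldl (fun ans w => if goA (msOf s.toList) w.toList (-1) then ans ++ [w] else ans) []

-- ===== PORT B =====
-- 'c in it' on an iterator: scan up to and including the first c, returning the
-- remaining suffix (none = iterator exhausted without finding c)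
def consume (c : Char) : List Char → Option (List Char)
  | [] => none
  | x :: xs => if x = c then some xs else consume c xs

def isSub : List Char → List Char → Bool
  | [], _ => true
  | c :: ws, cs =>
    match consume c cs with
    | none => false
    | some rest => isSub ws rest

def solve_alt (s : String) (words : List String) : List String :=
  words.filter (fun w => isSub w.toList s.toList)

-- ===== PRECONDITION & SPEC =====
def Spec_solve (s : String) (words : List String) (out : List String) : Prop := out = solve_alt s words
instance (s : String) (words : List String) (out : List String) : Decidable (Spec_solve s words out) := by unfold Spec_solve; infer_instance

-- ===== CLAIM (what is proved, stated in full; the proofs are below) =====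
def Claim_equal_solve : Prop := ∀ (s : String) (words : List String), Dom_solve s words → Spec_solve s words (solve s words)

-- ===== LEMMAS AND PROOFS =====

-- positions (as Int, starting at offset k) of the occurrences of ch in cs
def occ (ch : Char) : List Char → Int → List Int
  | [], _ => []
  | c :: cs, k => if c = ch then k :: occ ch cs (k + 1) else occ ch cs (k + 1)

-- offset-indexed first occurrence of ch in cs
def occFirst (ch : Char) : List Char → Int → Option Int
  | [], _ => none
  | c :: cs, b => if c = ch then some b else occFirst ch cs (b + 1)

theorem occ_lb (ch : Char) (cs : List Char) (k : Int) : ∀ x ∈ occ ch cs k, k ≤ x := by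
  induction cs generalizing k with
  | nil => simp [occ]
  | cons c cs ih =>
    intro x hx
    simp only [occ] at hx
    split at hx
    · rcases List.mem_cons.mp hx with h | h
      · omega
      · have := ih (k+1) x h; omega
    · have := ih (k+1) x hx; omega

theorem occ_pairwise (ch : Char) (cs : List Char) (k : Int) :
    (occ ch cs k).Pairwise (· ≤ ·) := by
  induction cs generalizing k with
  | nil => simp [occ]
  | cons c cs ih =>
    simp only [occ]
    split
    · exact List.Pairwise.cons (fun x hx => by have := occ_lb ch cs (k+1) x hx; omega) (ih (k+1))
    · exact ih (k+1)

theorem bisect_cons_gt (a v : Int) (l : List Int)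
    (hs : (a :: l).Pairwise (· ≤ ·)) (h : v < a) :
    PySem.List.bisectRight (a :: l) v = 0 := by
  obtain ⟨_, h2, _⟩ := PySem.List.bisectRight_spec (a :: l) v hs
  by_contra hne
  have h0 : (a :: l)[0] ≤ v := h2 0 (by simp) (by omega)
  simp at h0; omega

theorem bisect_cons_le (a v : Int) (l : List Int)
    (hs : (a :: l).Pairwise (· ≤ ·)) (h : a ≤ v) :
    PySem.List.bisectRight (a :: l) v = PySem.List.bisectRight l v + 1 := by
  have hs' : l.Pairwise (· ≤ ·) := hs.tail
  obtain ⟨hp1, hp2, hp3⟩ := PySem.List.bisectRight_spec (a :: l) v hs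
  obtain ⟨hq1, hq2, hq3⟩ := PySem.List.bisectRight_spec l v hs'
  set p := PySem.List.bisectRight (a :: l) v with hp
  set q := PySem.List.bisectRight l v with hq
  have hp0 : 0 < p := by
    by_contra hc
    have := hp3 0 (by simp) (by omega)
    simp at this; omega
  rcases Nat.lt_trichotomy p (q + 1) with hlt | heq | hgt
  · -- p ≤ q: index p-1 < q in l gives l[p-1] ≤ v, yet (a::l)[(p-1)+1] > v
    have h1 : p - 1 < q := by omega
    have hpl : p - 1 < l.length := by omega
    have hle : l[p - 1] ≤ v := hq2 (p - 1) hpl h1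
    have hgt' : v < (a :: l)[(p - 1) + 1]'(by simp; omega) :=
      hp3 ((p - 1) + 1) (by simp; omega) (by omega)
    simp only [List.getElem_cons_succ] at hgt'
    omega
  · exact heq
  · -- q + 1 < p: (a::l)[q+1] ≤ v, yet l[q] > v
    have hql : q < l.length := by
      have : p ≤ l.length + 1 := by simpa using hp1
      omega
    have hgt' : v < l[q] := hq3 q hql (le_refl _)
    have hle : (a :: l)[q + 1]'(by simp; omega) ≤ v := hp2 (q + 1) (by simp; omega) (by omega)
    simp only [List.getElem_cons_succ] at hle
    omega

theorem nextA_cons_gt (a v : Int) (l : List Int)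
    (hs : (a :: l).Pairwise (· ≤ ·)) (h : v < a) :
    nextA (a :: l) v = some a := by
  simp [nextA, bisect_cons_gt a v l hs h]

theorem nextA_cons_le (a v : Int) (l : List Int)
    (hs : (a :: l).Pairwise (· ≤ ·)) (h : a ≤ v) :
    nextA (a :: l) v = nextA l v := by
  simp only [nextA, bisect_cons_le a v l hs h]
  simp only [List.length_cons, ge_iff_le, Nat.add_le_add_iff_right, List.getD_cons_succ]

theorem occ_cons_pairwise (ch : Char) (cs : List Char) (k : Int) :
    (k :: occ ch cs (k + 1)).Pairwise (· ≤ ·) :=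
  List.Pairwise.cons (fun x hx => by have := occ_lb ch cs (k+1) x hx; omega)
    (occ_pairwise ch cs (k+1))

-- when v is below every recorded position, bisect finds the first occurrence
theorem nextA_occ_lt (ch : Char) (cs : List Char) (k v : Int) (h : v < k) :
    nextA (occ ch cs k) v = occFirst ch cs k := by
  induction cs generalizing k with
  | nil => simp [occ, occFirst, nextA, PySem.List.bisectRight]
  | cons c cs ih =>
    simp only [occ, occFirst]
    by_cases hc : c = ch
    · simp only [if_pos hc]
      exact nextA_cons_gt k v _ (occ_cons_pairwise ch cs k) h
    · simp only [if_neg hc]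
      exact ih (k + 1) (by omega)

-- bisecting the full occurrence list = first occurrence in the suffix after v
theorem nextA_occ (ch : Char) (cs : List Char) (k v : Int) (h : k ≤ v + 1) :
    nextA (occ ch cs k) v = occFirst ch (List.drop (v + 1 - k).toNat cs) (v + 1) := by
  induction cs generalizing k with
  | nil => simp [occ, occFirst, nextA, PySem.List.bisectRight]
  | cons c cs ih =>
    by_cases hk : k = v + 1
    · subst hk
      simp only [show (v + 1 - (v + 1)).toNat = 0 by omega, List.drop_zero]
      exact nextA_occ_lt ch (c :: cs) (v + 1) v (by omega)
    · have hk' : k ≤ v := by omega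
      rw [show (v + 1 - k).toNat = (v + 1 - (k + 1)).toNat + 1 by omega]
      simp only [List.drop_succ_cons]
      simp only [occ]
      by_cases hc : c = ch
      · simp only [if_pos hc]
        rw [nextA_cons_le k v _ (occ_cons_pairwise ch cs k) hk']
        exact ih (k + 1) (by omega)
      · simp only [if_neg hc]
        exact ih (k + 1) (by omega)

theorem occFirst_le (ch : Char) (cs : List Char) (b j : Int)
    (h : occFirst ch cs b = some j) : b ≤ j := by
  induction cs generalizing b with
  | nil => simp [occFirst] at h
  | cons c cs ih =>
    simp only [occFirst] at h
    split at h
    · simp at h; omega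
    · have := ih (b + 1) h; omega

theorem consume_of_occFirst (ch : Char) (cs : List Char) (b j : Int)
    (h : occFirst ch cs b = some j) :
    consume ch cs = some (List.drop (j - b + 1).toNat cs) := by
  induction cs generalizing b with
  | nil => simp [occFirst] at h
  | cons c cs ih =>
    simp only [occFirst] at h
    by_cases hc : c = ch
    · simp only [if_pos hc] at h
      simp at h
      subst h
      simp [consume, hc]
    · simp only [if_neg hc] at h
      have hb : b + 1 ≤ j := occFirst_le ch cs (b + 1) j h
      have := ih (b + 1) h
      simp only [consume, if_neg hc]
      rw [this]
      congr 1
      rw [show (j - b + 1).toNat = (j - (b + 1) + 1).toNat + 1 by omega]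
      simp

theorem consume_none_of_occFirst_none (ch : Char) (cs : List Char) (b : Int)
    (h : occFirst ch cs b = none) : consume ch cs = none := by
  induction cs generalizing b with
  | nil => rfl
  | cons c cs ih =>
    simp only [occFirst] at h
    split at h
    · exact absurd h (by simp)
    · rename_i hc
      simp only [consume, if_neg hc]
      exact ih (b + 1) h

theorem consume_eq_none (ch : Char) (cs : List Char) (h : ch ∉ cs) :
    consume ch cs = none := by
  induction cs with
  | nil => rfl
  | cons c cs ih =>
    simp only [List.mem_cons, not_or] at h
    simp only [consume, if_neg (Ne.symm h.1)]
    exact ih h.2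

-- the index entries of enumerate, filtered to one character, are its occurrence list
theorem enum_filter_occ (ch : Char) (cs : List Char) (k : Int) :
    List.map (fun x => x.2)
      (List.filter (fun p => p.1 == ch) ((PySem.List.enumerate cs k).map Prod.swap))
      = occ ch cs k := by
  induction cs generalizing k with
  | nil => simp [PySem.List.enumerate, occ]
  | cons c cs ih =>
    rw [PySem.List.enumerate_cons]
    simp only [List.map_cons, Prod.swap_prod_mk, occ]
    by_cases hc : c = ch
    · rw [List.filter_cons_of_pos (by simpa using hc)]
      simp only [List.map_cons, if_pos hc]
      rw [ih (k + 1)]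
    · rw [List.filter_cons_of_neg (by simpa using hc)]
      simp only [if_neg hc]
      rw [ih (k + 1)]

-- the built dict: per-character value lists are exactly the occurrence lists
theorem msOf_getD (cs : List Char) (ch : Char) :
    (msOf cs).getD ch [] = occ ch cs 0 := by
  have hmap : ((PySem.List.enumerate cs).map Prod.swap).foldl
      (fun d p => d.modify p.1 [] (fun l => l ++ [p.2])) PySem.Dict.empty
      = msOf cs := by
    rw [List.foldl_map]; rfl
  rw [← hmap, PySem.Dict.getD_foldl_modify_append, PySem.Dict.getD_empty]
  simp only [List.nil_append]
  exact enum_filter_occ ch cs 0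

theorem msOf_contains (cs : List Char) (ch : Char) :
    (msOf cs).contains ch = true ↔ ch ∈ cs := by
  rw [PySem.Dict.contains_iff_mem_keys]
  have hk := PySem.Dict.keys_foldl_modify_key (PySem.List.enumerate cs)
    (fun p => p.2) ([] : List Int) (fun _ p => fun l => l ++ [p.1])
    (PySem.Dict.empty : PySem.Dict Char (List Int))
  rw [show (msOf cs).keys = PySem.Set.update
      (PySem.Dict.empty : PySem.Dict Char (List Int)).keys
      ((PySem.List.enumerate cs).map (fun p => p.2)) from hk]
  rw [PySem.List.map_snd_enumerate]
  rw [show (PySem.Dict.empty : PySem.Dict Char (List Int)).keys = [] from rfl]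
  rw [PySem.Set.update_nil_left]
  exact PySem.Set.mem_ofList cs ch

-- main invariant: A's indexed loop from state v = B's greedy scan of the suffix after v
theorem goA_eq_isSub (cs : List Char) (word : List Char) (v : Int) (hv : -1 ≤ v) :
    goA (msOf cs) word v = isSub word (List.drop (v + 1).toNat cs) := by
  induction word generalizing v with
  | nil => simp [goA, isSub]
  | cons ch rest ih =>
    simp only [goA, isSub]
    by_cases hmem : ch ∈ cs
    · rw [if_neg (by simp [(msOf_contains cs ch).mpr hmem])]
      rw [msOf_getD cs ch]
      rw [nextA_occ ch cs 0 v (by omega)]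
      rw [show (v + 1 - 0).toNat = (v + 1).toNat from by omega]
      cases hof : occFirst ch (List.drop (v + 1).toNat cs) (v + 1) with
      | none => rw [consume_none_of_occFirst_none ch _ (v + 1) hof]
      | some j =>
        have hj : v + 1 ≤ j := occFirst_le _ _ _ _ hof
        rw [consume_of_occFirst ch _ (v + 1) j hof]
        rw [List.drop_drop]
        rw [show (v + 1).toNat + (j - (v + 1) + 1).toNat = (j + 1).toNat from by omega]
        exact ih j (by omega)
    · have hns : ch ∉ List.drop (v + 1).toNat cs :=
        fun hx => hmem (List.mem_of_mem_drop hx)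
      rw [if_pos (by
        rw [← Bool.not_eq_true, msOf_contains cs ch]; exact hmem)]
      rw [consume_eq_none ch _ hns]

-- ===== VERDICT (by name: the statement is the Claim_ definition above) =====
theorem solve_spec : Claim_equal_solve := by
  intro s words _hdom
  unfold Spec_solve solve solve_alt
  rw [PySem.List.foldl_append_if (fun w => goA (msOf s.toList) w.toList (-1)) (fun w => w) words []]
  simp only [List.nil_append, List.map_id']
  apply List.filter_congr
  intro w _
  have := goA_eq_isSub s.toList w.toList (-1) (by omega)
  simpa using this
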